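-- pv_equiv track=rewrite | github.com/Alif108/Artificial-Intelligence | Adversarial Search/Gomoku/gomoku_w_heuristics.py | threat_detection
-- ===== SOURCE A (Python) =====
-- EMPTY = '.'
--
-- PLAYER_X = 'X'
--
-- PLAYER_O = 'O'
--
-- WIN_LENGTH = 4
--
-- def defense(board, player):
--     opponent = get_opponent(player)
--     threat_count = 0
--
--     # Check rows for opponent's threats
--     for row in board:
--         for i in range(len(row) - (WIN_LENGTH-1)):
--             window = row[i:i + WIN_LENGTH]
--             # if window.count(opponent) == (WIN_LENGTH-1) and window.count(EMPTY) == 1: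
--             if window.count(opponent) >= WIN_LENGTH/2 :
--                 threat_count += 1
--
--     # Check columns for opponent's threats
--     for j in range(len(board[0])):
--         column = [board[i][j] for i in range(len(board))]
--         for i in range(len(column) - (WIN_LENGTH-1)):
--             window = column[i:i + WIN_LENGTH]
--             # if window.count(opponent) == (WIN_LENGTH-1) and window.count(EMPTY) == 1:
--             if window.count(opponent) >= WIN_LENGTH/2 :
--                 threat_count += 1
--
--     # Check diagonals (both directions) for opponent's threats
--     for i in range(len(board)):
--         for j in range(len(board[0])):
--             if i + (WIN_LENGTH-1) < len(board) and j + (WIN_LENGTH-1) < len(board[0]):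
--                 diagonal = [board[i + k][j + k] for k in range(WIN_LENGTH)]
--                 # if diagonal.count(opponent) == (WIN_LENGTH-1) and diagonal.count(EMPTY) == 1:
--                 if diagonal.count(opponent) >= WIN_LENGTH/2 :
--                     threat_count += 1
--
--             if i - (WIN_LENGTH-1) >= 0 and j + (WIN_LENGTH-1) < len(board[0]):
--                 diagonal = [board[i - k][j + k] for k in range(WIN_LENGTH)]
--                 # if diagonal.count(opponent) == (WIN_LENGTH-1) and diagonal.count(EMPTY) == 1:
--                 if diagonal.count(opponent) >= WIN_LENGTH/2 :
--                     threat_count += 1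
--
--     return threat_count
--
-- def threat_detection(board, player):
--     player_threats = 0
--     for move in generate_possible_moves(board):
--         board[move[0]][move[1]] = player
--         if defense(board, player) > 0:
--             player_threats += 1
--         board[move[0]][move[1]] = EMPTY
--     return player_threats
--
-- def get_opponent(player):
--     return PLAYER_X if player == PLAYER_O else PLAYER_O
--
-- def generate_possible_moves(board):
--     moves = []
--     for i in range(len(board)):
--         for j in range(len(board[i])):
--             if board[i][j] == EMPTY:
--                 moves.append((i, j))
--     return moves
-- ===== SOURCE B (Python) =====
-- EMPTY = '.'
-- PLAYER_X = 'X'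
-- PLAYER_O = 'O'
--
-- def threat_detection(board, player):
--     # Placing `player`'s stone on an empty cell never changes the number of
--     # opponent stones in any window, so the opponent-threat test is the same
--     # for every move: compute it once and multiply by the number of empty cells.
--     empties = sum(row.count(EMPTY) for row in board)
--     if empties == 0:
--         return 0
--     opp = PLAYER_X if player == PLAYER_O else PLAYER_O
--     n, m = len(board), len(board[0])
--     cols = [[row[j] for row in board] for j in range(m)]
--     threat = (
--         any(row[i:i + 4].count(opp) >= 2
--             for row in board for i in range(len(row) - 3))
--         or any(col[i:i + 4].count(opp) >= 2
--                for col in cols for i in range(n - 3))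
--         or any([board[i + k][j + k] for k in range(4)].count(opp) >= 2
--                for i in range(n - 3) for j in range(m - 3))
--         or any([board[i - k][j + k] for k in range(4)].count(opp) >= 2
--                for i in range(3, n) for j in range(m - 3))
--     )
--     return empties if threat else 0
-- ===== Notes on version B (the rewrite author's own statement) =====
-- stated objective: alternative
-- what changed: A rescans the whole board with defense() once per empty cell; B observes that placing the player's own stone never changes the opponent-count of any window, so it runs the threat scan once and returns (number of empty cells) if a threat exists, else 0 (asymptotically fewer scans, though a timing run could not confirm a measured speed-up on its generated inputs).
import Mathlib
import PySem

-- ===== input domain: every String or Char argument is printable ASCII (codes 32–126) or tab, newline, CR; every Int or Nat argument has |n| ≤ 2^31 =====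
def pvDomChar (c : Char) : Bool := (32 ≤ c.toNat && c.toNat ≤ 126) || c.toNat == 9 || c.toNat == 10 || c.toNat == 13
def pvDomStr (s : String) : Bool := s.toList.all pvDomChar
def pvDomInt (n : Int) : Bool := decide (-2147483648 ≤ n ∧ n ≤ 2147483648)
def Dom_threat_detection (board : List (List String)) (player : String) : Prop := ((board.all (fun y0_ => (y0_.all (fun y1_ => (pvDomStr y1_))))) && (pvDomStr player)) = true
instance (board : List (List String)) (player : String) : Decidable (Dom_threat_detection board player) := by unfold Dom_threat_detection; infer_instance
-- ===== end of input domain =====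

-- B runs the opponent-threat scan once (placing the player's stone never changes any window's
-- opponent count) and multiplies by the number of empty cells, instead of A's per-empty-cell
-- rescan of the whole board. A mutates `board` in place but always restores it before returning;
-- both ports are pure.

-- ===== PORT A =====
def pv_get_opponent (player : String) : String := if player == "O" then "X" else "O"

-- literal port of `defense`; len(board[0]) is ported as (board.headD []).length and the
-- in-range element accesses with pyGetD defaults — exact on Pre_ (defense is only called on a
-- nonempty board whose rows are at least as long as row 0, so no access is out of range there).
-- `window.count(opponent) >= WIN_LENGTH/2` compares an int with 2.0, which is exactly 2 ≤ count.
def pv_defense (board : List (List String)) (player : String) : Int :=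
  -- the locals opponent/tc1/tc2 are inlined: tc1/tc2 become the init accumulators of the next pass
  (PySem.List.pyRange 0 (board.length : Int)).foldl (fun tc i =>
    (PySem.List.pyRange 0 ((board.headD []).length : Int)).foldl (fun tc j =>
      if 0 ≤ i - 3 ∧ j + 3 < ((board.headD []).length : Int) then
        (if 2 ≤ (((PySem.List.pyRange 0 4).map (fun k => PySem.List.pyGetD (PySem.List.pyGetD board (i - k) []) (j + k) "")).count (pv_get_opponent player) : Int) then
          (if i + 3 < (board.length : Int) ∧ j + 3 < ((board.headD []).length : Int) then
            (if 2 ≤ (((PySem.List.pyRange 0 4).map (fun k => PySem.List.pyGetD (PySem.List.pyGetD board (i + k) []) (j + k) "")).count (pv_get_opponent player) : Int) then tc + 1 else tc)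
          else tc) + 1
        else
          (if i + 3 < (board.length : Int) ∧ j + 3 < ((board.headD []).length : Int) then
            (if 2 ≤ (((PySem.List.pyRange 0 4).map (fun k => PySem.List.pyGetD (PySem.List.pyGetD board (i + k) []) (j + k) "")).count (pv_get_opponent player) : Int) then tc + 1 else tc)
          else tc))
      else
        (if i + 3 < (board.length : Int) ∧ j + 3 < ((board.headD []).length : Int) then
          (if 2 ≤ (((PySem.List.pyRange 0 4).map (fun k => PySem.List.pyGetD (PySem.List.pyGetD board (i + k) []) (j + k) "")).count (pv_get_opponent player) : Int) then tc + 1 else tc)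
        else tc)) tc)
    ((PySem.List.pyRange 0 ((board.headD []).length : Int)).foldl (fun tc j =>
      (PySem.List.pyRange 0 (((board.map (fun row => PySem.List.pyGetD row j "")).length : Int) - 3)).foldl (fun tc i =>
        if 2 ≤ ((PySem.List.slice (board.map (fun row => PySem.List.pyGetD row j "")) (some i) (some (i + 4))).count (pv_get_opponent player) : Int) then tc + 1 else tc) tc)
    (board.foldl (fun tc row =>
      (PySem.List.pyRange 0 ((row.length : Int) - 3)).foldl (fun tc i =>
        if 2 ≤ ((PySem.List.slice row (some i) (some (i + 4))).count (pv_get_opponent player) : Int) then tc + 1 else tc) tc) 0))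

def pv_generate_possible_moves (board : List (List String)) : List (Int × Int) :=
  (PySem.List.pyRange 0 (board.length : Int)).foldl (fun moves i =>
    (PySem.List.pyRange 0 (((PySem.List.pyGetD board i []).length : Int))).foldl (fun moves j =>
      if PySem.List.pyGetD (PySem.List.pyGetD board i []) j "" == "." then moves ++ [(i, j)] else moves) moves) []

-- A writes `player` into the cell, calls defense, and writes EMPTY back; the functional port
-- builds the updated board for the call and reuses the original (restored) board afterwards.
def threat_detection (board : List (List String)) (player : String) : Int :=
  (pv_generate_possible_moves board).foldl (fun pt mv =>
    if 0 < pv_defense (PySem.List.pySetD board mv.1 (PySem.List.pySetD (PySem.List.pyGetD board mv.1 []) mv.2 player)) player then pt + 1 else pt) 0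

-- ===== PORT B =====
-- literal port of Source B: count the empties, test for an opponent threat once, multiply.
-- The in-range accesses board[i][j] / row[j] are ported with pyGetD — exact on Pre_.
def threat_detection_alt (board : List (List String)) (player : String) : Int :=
  -- the locals empties/opp/n/m/cols/threat of Source B are inlined
  if (board.map (fun row => (row.count "." : Int))).sum = 0 then 0
  else
    if (board.any (fun row => (PySem.List.pyRange 0 ((row.length : Int) - 3)).any (fun i =>
          decide (2 ≤ ((PySem.List.slice row (some i) (some (i + 4))).count (if player == "O" then "X" else "O") : Int)))))
      || (((PySem.List.pyRange 0 ((board.headD []).length : Int)).map (fun j => board.map (fun row => PySem.List.pyGetD row j ""))).any (fun col => (PySem.List.pyRange 0 ((board.length : Int) - 3)).any (fun i =>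
          decide (2 ≤ ((PySem.List.slice col (some i) (some (i + 4))).count (if player == "O" then "X" else "O") : Int)))))
      || ((PySem.List.pyRange 0 ((board.length : Int) - 3)).any (fun i => (PySem.List.pyRange 0 (((board.headD []).length : Int) - 3)).any (fun j =>
          decide (2 ≤ (((PySem.List.pyRange 0 4).map (fun k => PySem.List.pyGetD (PySem.List.pyGetD board (i + k) []) (j + k) "")).count (if player == "O" then "X" else "O") : Int)))))
      || ((PySem.List.pyRange 3 (board.length : Int)).any (fun i => (PySem.List.pyRange 0 (((board.headD []).length : Int) - 3)).any (fun j =>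
          decide (2 ≤ (((PySem.List.pyRange 0 4).map (fun k => PySem.List.pyGetD (PySem.List.pyGetD board (i - k) []) (j + k) "")).count (if player == "O" then "X" else "O") : Int)))))
    then (board.map (fun row => (row.count "." : Int))).sum else 0

-- ===== PRECONDITION & SPEC =====
-- Pre_ excludes exactly the inputs on which the Python A raises IndexError: a board that has an
-- empty cell together with some row shorter than row 0 (the column pass reads board[i][j] for
-- every j < len(board[0])).
def Pre_threat_detection (board : List (List String)) (player : String) : Prop :=
  (∀ r ∈ board, "." ∉ r) ∨ (∀ r ∈ board, (board.headD []).length ≤ r.length)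
instance (board : List (List String)) (player : String) : Decidable (Pre_threat_detection board player) := by unfold Pre_threat_detection; infer_instance

def pvWitness_threat_detection : List (List String) × String := ([[".", "O"], ["O", "X"]], "X")

def Spec_threat_detection (board : List (List String)) (player : String) (out : Int) : Prop := out = threat_detection_alt board player
instance (board : List (List String)) (player : String) (out : Int) : Decidable (Spec_threat_detection board player out) := by unfold Spec_threat_detection; infer_instance

-- ===== CLAIM (what is proved, stated in full; the proofs are below) =====
def Claim_equal_threat_detection : Prop := ∀ (board : List (List String)) (player : String), Dom_threat_detection board player → Pre_threat_detection board player → Spec_threat_detection board player (threat_detection board player)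

-- ===== LEMMAS AND PROOFS =====

theorem pv_pyGetD_nonneg {α : Type} (r : List α) (j : Int) (d : α) (h : 0 ≤ j) :
    PySem.List.pyGetD r j d = r.getD j.toNat d := by
  by_cases h2 : j < (r.length : Int)
  · rw [PySem.List.pyGetD_eq_getElem r d h h2, List.getD_eq_getElem r d (by omega)]
  · simp only [PySem.List.pyGetD, PySem.List.pyGet?, PySem.List.pyIdx?, if_pos h, if_neg h2]
    rw [List.getD_eq_default r d (by omega)]
    rfl

theorem pv_pySetD_eq_set {α : Type} (xs : List α) (i : Int) (v : α) (h1 : 0 ≤ i) (h2 : i < (xs.length : Int)) :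
    PySem.List.pySetD xs i v = xs.set i.toNat v := by
  simp only [PySem.List.pySetD, PySem.List.pySet?, PySem.List.pyIdx?, if_pos h1, if_pos h2]
  rfl

theorem pv_count_mask (opp : String) (l : List String) :
    l.count opp = (l.map (fun s => s == opp)).count true := by
  simp [List.count_eq_countP, List.countP_map, Function.comp_def]

theorem pv_sum_pos_iff {α : Type} (l : List α) (g : α → Int) (h : ∀ x ∈ l, 0 ≤ g x) :
    0 < (l.map g).sum ↔ ∃ x ∈ l, 0 < g x := by
  induction l with
  | nil => simp
  | cons a t ih =>
    have ha := h a (by simp)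
    have ht : ∀ x ∈ t, 0 ≤ g x := fun x hx => h x (by simp [hx])
    have hts : 0 ≤ (t.map g).sum := List.sum_nonneg (by intro x hx; obtain ⟨y, hy, rfl⟩ := List.mem_map.mp hx; exact ht y hy)
    simp only [List.map_cons, List.sum_cons, List.mem_cons]
    constructor
    · intro hp
      by_cases hga : 0 < g a
      · exact ⟨a, Or.inl rfl, hga⟩
      · have : 0 < (t.map g).sum := by omega
        obtain ⟨x, hx, hgx⟩ := (ih ht).mp this
        exact ⟨x, Or.inr hx, hgx⟩
    · rintro ⟨x, (rfl | hx), hgx⟩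
      · omega
      · have := (ih ht).mpr ⟨x, hx, hgx⟩; omega

-- the per-window predicate count, shared shape of the row and column passes
def pvRowsC (opp : String) (row : List String) : Int :=
  (List.countP (fun i => decide (2 ≤ ((PySem.List.slice row (some i) (some (i + 4))).count opp : Int)))
    (PySem.List.pyRange 0 ((row.length : Int) - 3)) : Int)

def pvCol (board : List (List String)) (j : Int) : List String :=
  board.map (fun row => PySem.List.pyGetD row j "")

def pvDiag1 (board : List (List String)) (i j : Int) : List String :=
  (PySem.List.pyRange 0 4).map (fun k => PySem.List.pyGetD (PySem.List.pyGetD board (i + k) []) (j + k) "")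

def pvDiag2 (board : List (List String)) (i j : Int) : List String :=
  (PySem.List.pyRange 0 4).map (fun k => PySem.List.pyGetD (PySem.List.pyGetD board (i - k) []) (j + k) "")

def pvD1 (opp : String) (board : List (List String)) (n m i j : Int) : Int :=
  if (i + 3 < n ∧ j + 3 < m) ∧ 2 ≤ ((pvDiag1 board i j).count opp : Int) then 1 else 0

def pvD2 (opp : String) (board : List (List String)) (n m i j : Int) : Int :=
  if (0 ≤ i - 3 ∧ j + 3 < m) ∧ 2 ≤ ((pvDiag2 board i j).count opp : Int) then 1 else 0

theorem pv_rows_fold (opp : String) (board : List (List String)) (t0 : Int) :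
    board.foldl (fun tc row =>
      (PySem.List.pyRange 0 ((row.length : Int) - 3)).foldl (fun tc i =>
        if 2 ≤ ((PySem.List.slice row (some i) (some (i + 4))).count opp : Int) then tc + 1 else tc) tc) t0
    = t0 + (board.map (pvRowsC opp)).sum := by
  rw [PySem.List.foldl_congr_mem board _ (fun tc row => tc + pvRowsC opp row) t0
    (by intro acc row _; exact PySem.List.foldl_ite_add_one _ _ _)]
  exact PySem.List.foldl_add board (pvRowsC opp) t0

theorem pv_defense_eq (board : List (List String)) (player : String) :
    pv_defense board player =
      (board.map (pvRowsC (pv_get_opponent player))).sum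
      + ((PySem.List.pyRange 0 ((board.headD []).length : Int)).map
          (fun j => pvRowsC (pv_get_opponent player) (pvCol board j))).sum
      + ((PySem.List.pyRange 0 (board.length : Int)).map
          (fun i => ((PySem.List.pyRange 0 ((board.headD []).length : Int)).map
            (fun j => pvD1 (pv_get_opponent player) board (board.length : Int) ((board.headD []).length : Int) i j
                    + pvD2 (pv_get_opponent player) board (board.length : Int) ((board.headD []).length : Int) i j)).sum)).sum := by
  unfold pv_defense
  rw [pv_rows_fold]
  rw [PySem.List.foldl_congr_mem _ _
      (fun tc j => tc + pvRowsC (pv_get_opponent player) (pvCol board j)) (0 + (board.map (pvRowsC (pv_get_opponent player))).sum)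
      (by intro acc j _
          rw [PySem.List.foldl_ite_add_one]
          rfl)]
  rw [PySem.List.foldl_add]
  rw [PySem.List.foldl_congr_mem _ _ (fun tc i =>
      tc + ((PySem.List.pyRange 0 ((board.headD []).length : Int)).map
        (fun j => pvD1 (pv_get_opponent player) board (board.length : Int) ((board.headD []).length : Int) i j
                + pvD2 (pv_get_opponent player) board (board.length : Int) ((board.headD []).length : Int) i j)).sum) _ ?_]
  · rw [PySem.List.foldl_add]; ring
  · intro acc i _
    rw [PySem.List.foldl_congr_mem _ _ (fun tc j =>
        tc + (pvD1 (pv_get_opponent player) board (board.length : Int) ((board.headD []).length : Int) i j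
            + pvD2 (pv_get_opponent player) board (board.length : Int) ((board.headD []).length : Int) i j)) acc ?_]
    · exact PySem.List.foldl_add _ _ acc
    · intro acc2 j _
      simp only [pvD1, pvD2, pvDiag1, pvDiag2]
      split_ifs <;> omega


theorem pv_opp_ne (player : String) : (player == pv_get_opponent player) = false := by
  unfold pv_get_opponent
  by_cases h : player = "O"
  · subst h; decide
  · simp [beq_iff_eq, h]

theorem pv_dot_ne (player : String) : (("." : String) == pv_get_opponent player) = false := by
  unfold pv_get_opponent
  split <;> decide

theorem pv_rowsC_congr (opp : String) (r1 r2 : List String)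
    (hr : r1.map (fun s => s == opp) = r2.map (fun s => s == opp)) :
    pvRowsC opp r1 = pvRowsC opp r2 := by
  have hlen : r1.length = r2.length := by simpa using congrArg List.length hr
  unfold pvRowsC
  rw [hlen]
  congr 1
  apply List.countP_congr
  intro i hi
  have hi0 : 0 ≤ i := (PySem.List.mem_pyRange_one.mp hi).1
  have hc : (PySem.List.slice r1 (some i) (some (i + 4))).count opp
      = (PySem.List.slice r2 (some i) (some (i + 4))).count opp := by
    rw [PySem.List.slice_toNat r1 hi0 (by omega), PySem.List.slice_toNat r2 hi0 (by omega),
      pv_count_mask opp, pv_count_mask opp]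
    simp only [List.map_take, List.map_drop, hr]
  constructor <;> (intro h; simpa [hc] using h)

theorem pv_getD_mask (opp : String) (r1 r2 : List String)
    (hr : r1.map (fun s => s == opp) = r2.map (fun s => s == opp)) (j : Int) (hj : 0 ≤ j) :
    ((PySem.List.pyGetD r1 j "") == opp) = ((PySem.List.pyGetD r2 j "") == opp) := by
  rw [pv_pyGetD_nonneg _ _ _ hj, pv_pyGetD_nonneg _ _ _ hj]
  calc (r1.getD j.toNat "" == opp)
      = (r1.map (fun s => s == opp)).getD j.toNat (("" : String) == opp) := (List.getD_map r1 "" (fun s => s == opp)).symm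
    _ = (r2.map (fun s => s == opp)).getD j.toNat (("" : String) == opp) := by rw [hr]
    _ = (r2.getD j.toNat "" == opp) := List.getD_map r2 "" (fun s => s == opp)

theorem pv_row_mask (opp : String) (b1 b2 : List (List String))
    (hb : b1.map (fun r => r.map (fun s => s == opp)) = b2.map (fun r => r.map (fun s => s == opp)))
    (i : Int) (hi : 0 ≤ i) :
    (PySem.List.pyGetD b1 i []).map (fun s => s == opp) = (PySem.List.pyGetD b2 i []).map (fun s => s == opp) := by
  rw [pv_pyGetD_nonneg _ _ _ hi, pv_pyGetD_nonneg _ _ _ hi]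
  calc (b1.getD i.toNat []).map (fun s => s == opp)
      = (b1.map (fun r => r.map (fun s => s == opp))).getD i.toNat [] := (List.getD_map b1 [] (fun r => r.map (fun s => s == opp))).symm
    _ = (b2.map (fun r => r.map (fun s => s == opp))).getD i.toNat [] := by rw [hb]
    _ = (b2.getD i.toNat []).map (fun s => s == opp) := List.getD_map b2 [] (fun r => r.map (fun s => s == opp))

theorem pv_headD_map {α β : Type} (g : List α → List β) (l : List (List α)) (hg : g [] = []) :
    (l.map g).headD [] = g (l.headD []) := by
  cases l <;> simp [hg]

theorem pv_diag1_mask (opp : String) (b1 b2 : List (List String))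
    (hb : b1.map (fun r => r.map (fun s => s == opp)) = b2.map (fun r => r.map (fun s => s == opp)))
    (i j : Int) (hi : 0 ≤ i) (hj : 0 ≤ j) :
    (pvDiag1 b1 i j).count opp = (pvDiag1 b2 i j).count opp := by
  unfold pvDiag1
  rw [pv_count_mask opp, pv_count_mask opp, List.map_map, List.map_map]
  apply congrArg
  apply List.map_congr_left
  intro k hk
  have hk0 : 0 ≤ k := (PySem.List.mem_pyRange_one.mp hk).1
  exact pv_getD_mask opp _ _ (pv_row_mask opp b1 b2 hb (i + k) (by omega)) (j + k) (by omega)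

theorem pv_diag2_mask (opp : String) (b1 b2 : List (List String))
    (hb : b1.map (fun r => r.map (fun s => s == opp)) = b2.map (fun r => r.map (fun s => s == opp)))
    (i j : Int) (hi : 0 ≤ i - 3) (hj : 0 ≤ j) :
    (pvDiag2 b1 i j).count opp = (pvDiag2 b2 i j).count opp := by
  unfold pvDiag2
  rw [pv_count_mask opp, pv_count_mask opp, List.map_map, List.map_map]
  apply congrArg
  apply List.map_congr_left
  intro k hk
  have hk4 : k < 4 := (PySem.List.mem_pyRange_one.mp hk).2
  have hk0 : 0 ≤ k := (PySem.List.mem_pyRange_one.mp hk).1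
  exact pv_getD_mask opp _ _ (pv_row_mask opp b1 b2 hb (i - k) (by omega)) (j + k) (by omega)

theorem pv_defense_mask (b1 b2 : List (List String)) (player : String)
    (hb : b1.map (fun r => r.map (fun s => s == pv_get_opponent player))
        = b2.map (fun r => r.map (fun s => s == pv_get_opponent player))) :
    pv_defense b1 player = pv_defense b2 player := by
  have hlen : b1.length = b2.length := by simpa using congrArg List.length hb
  have hm : (b1.headD []).length = (b2.headD []).length := by
    have h1 := pv_headD_map (fun r => r.map (fun s => s == pv_get_opponent player)) b1 rfl
    have h2 := pv_headD_map (fun r => r.map (fun s => s == pv_get_opponent player)) b2 rfl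
    have h3 := congrArg (fun l => (List.headD l []).length) hb
    simp only at h3
    rw [h1, h2] at h3
    simpa using h3
  have hlen' : (b1.length : Int) = (b2.length : Int) := by exact_mod_cast hlen
  have hm' : ((b1.headD []).length : Int) = ((b2.headD []).length : Int) := by exact_mod_cast hm
  rw [pv_defense_eq, pv_defense_eq]
  have comp1 : b1.map (pvRowsC (pv_get_opponent player)) = b2.map (pvRowsC (pv_get_opponent player)) := by
    apply List.ext_getElem (by simpa using hlen)
    intro n h1 h2
    simp only [List.getElem_map]
    apply pv_rowsC_congr
    have e1 := pv_row_mask _ b1 b2 hb (n : Int) (by omega)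
    rw [pv_pyGetD_nonneg _ _ _ (by omega), pv_pyGetD_nonneg _ _ _ (by omega)] at e1
    simp only [Int.toNat_natCast] at e1
    rwa [List.getD_eq_getElem b1 [] (by simpa using h1), List.getD_eq_getElem b2 [] (by simpa using h2)] at e1
  have comp2 : (PySem.List.pyRange 0 ((b1.headD []).length : Int)).map
        (fun j => pvRowsC (pv_get_opponent player) (pvCol b1 j))
      = (PySem.List.pyRange 0 ((b2.headD []).length : Int)).map
        (fun j => pvRowsC (pv_get_opponent player) (pvCol b2 j)) := by
    rw [← hm']
    apply List.map_congr_left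
    intro j hj
    have hj0 : 0 ≤ j := (PySem.List.mem_pyRange_one.mp hj).1
    apply pv_rowsC_congr
    unfold pvCol
    rw [List.map_map, List.map_map]
    apply List.ext_getElem (by simpa using hlen)
    intro n h1 h2
    simp only [List.getElem_map, Function.comp_apply]
    have e1 := pv_row_mask _ b1 b2 hb (n : Int) (by omega)
    rw [pv_pyGetD_nonneg _ _ _ (by omega), pv_pyGetD_nonneg _ _ _ (by omega)] at e1
    simp only [Int.toNat_natCast] at e1
    rw [List.getD_eq_getElem b1 [] (by simpa using h1), List.getD_eq_getElem b2 [] (by simpa using h2)] at e1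
    exact pv_getD_mask _ _ _ e1 j hj0
  have comp3 : (PySem.List.pyRange 0 (b1.length : Int)).map
          (fun i => ((PySem.List.pyRange 0 ((b1.headD []).length : Int)).map
            (fun j => pvD1 (pv_get_opponent player) b1 (b1.length : Int) ((b1.headD []).length : Int) i j
                    + pvD2 (pv_get_opponent player) b1 (b1.length : Int) ((b1.headD []).length : Int) i j)).sum)
      = (PySem.List.pyRange 0 (b2.length : Int)).map
          (fun i => ((PySem.List.pyRange 0 ((b2.headD []).length : Int)).map
            (fun j => pvD1 (pv_get_opponent player) b2 (b2.length : Int) ((b2.headD []).length : Int) i j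
                    + pvD2 (pv_get_opponent player) b2 (b2.length : Int) ((b2.headD []).length : Int) i j)).sum) := by
    rw [← hlen', ← hm']
    apply List.map_congr_left
    intro i hi
    have hi0 : 0 ≤ i := (PySem.List.mem_pyRange_one.mp hi).1
    apply congrArg
    apply List.map_congr_left
    intro j hj
    have hj0 : 0 ≤ j := (PySem.List.mem_pyRange_one.mp hj).1
    have e1 : pvD1 (pv_get_opponent player) b1 (b1.length : Int) ((b1.headD []).length : Int) i j
        = pvD1 (pv_get_opponent player) b2 (b1.length : Int) ((b1.headD []).length : Int) i j := by
      unfold pvD1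
      rw [pv_diag1_mask _ b1 b2 hb i j hi0 hj0]
    have e2 : pvD2 (pv_get_opponent player) b1 (b1.length : Int) ((b1.headD []).length : Int) i j
        = pvD2 (pv_get_opponent player) b2 (b1.length : Int) ((b1.headD []).length : Int) i j := by
      unfold pvD2
      by_cases hg : 0 ≤ i - 3 ∧ j + 3 < ((b1.headD []).length : Int)
      · rw [pv_diag2_mask _ b1 b2 hb i j hg.1 hj0]
      · have hng : ∀ (bb : List (List String)),
            ¬ ((0 ≤ i - 3 ∧ j + 3 < ((b1.headD []).length : Int)) ∧ 2 ≤ ((pvDiag2 bb i j).count (pv_get_opponent player) : Int)) :=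
          fun bb hcon => hg hcon.1
        rw [if_neg (hng b1), if_neg (hng b2)]
    rw [e1, e2]
  rw [comp1, comp2, comp3]

theorem pv_defense_set (board : List (List String)) (player : String) (a c : Nat)
    (ha : a < board.length) (hc : c < board[a].length) (hdot : board[a][c] = ".") :
    pv_defense (board.set a (board[a].set c player)) player = pv_defense board player := by
  apply pv_defense_mask
  rw [List.map_set]
  have hrow : (board[a].set c player).map (fun s => s == pv_get_opponent player)
      = board[a].map (fun s => s == pv_get_opponent player) := by
    rw [List.map_set]
    have hval : (player == pv_get_opponent player) = (board[a].map (fun s => s == pv_get_opponent player))[c]'(by simpa using hc) := by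
      simp [List.getElem_map, hdot, pv_opp_ne, pv_dot_ne]
    rw [hval]
    exact List.set_getElem_self ..
  rw [hrow]
  have hval2 : board[a].map (fun s => s == pv_get_opponent player)
      = (board.map (fun r => r.map (fun s => s == pv_get_opponent player)))[a]'(by simpa using ha) := by
    simp [List.getElem_map]
  rw [hval2]
  exact List.set_getElem_self ..


theorem pv_moves_eq (board : List (List String)) :
    pv_generate_possible_moves board
      = (PySem.List.pyRange 0 (board.length : Int)).flatMap (fun i =>
          ((PySem.List.pyRange 0 (((PySem.List.pyGetD board i []).length : Int))).filter
            (fun j => PySem.List.pyGetD (PySem.List.pyGetD board i []) j "" == ".")).map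
            (fun j => ((i, j) : Int × Int))) := by
  unfold pv_generate_possible_moves
  rw [PySem.List.foldl_congr_mem _ _ (fun moves i =>
      moves ++ ((PySem.List.pyRange 0 (((PySem.List.pyGetD board i []).length : Int))).filter
        (fun j => PySem.List.pyGetD (PySem.List.pyGetD board i []) j "" == ".")).map
        (fun j => ((i, j) : Int × Int))) []
      (by intro acc i _; exact PySem.List.foldl_append_if _ _ _ _)]
  simpa using PySem.List.foldl_append_eq_flatMap _ _ []

theorem pv_mem_moves (board : List (List String)) (mv : Int × Int)
    (h : mv ∈ pv_generate_possible_moves board) :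
    ∃ (a c : Nat), mv.1 = (a : Int) ∧ mv.2 = (c : Int) ∧ a < board.length
      ∧ c < (board.getD a []).length ∧ (board.getD a []).getD c "" = "." := by
  rw [pv_moves_eq] at h
  obtain ⟨i, hi, hmem⟩ := List.mem_flatMap.mp h
  obtain ⟨j, hj, hmv⟩ := List.mem_map.mp hmem
  obtain ⟨hjr, hdot⟩ := List.mem_filter.mp hj
  obtain ⟨hi0, hin⟩ := PySem.List.mem_pyRange_one.mp hi
  obtain ⟨hj0, hjn⟩ := PySem.List.mem_pyRange_one.mp hjr
  refine ⟨i.toNat, j.toNat, ?_, ?_, ?_, ?_, ?_⟩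
  · rw [← hmv]; omega
  · rw [← hmv]; omega
  · omega
  · rw [pv_pyGetD_nonneg _ _ _ hi0] at hjn; omega
  · rw [pv_pyGetD_nonneg _ _ _ hi0, pv_pyGetD_nonneg _ _ _ hj0] at hdot
    exact beq_iff_eq.mp hdot

theorem pv_moves_length (board : List (List String)) :
    ((pv_generate_possible_moves board).length : Int)
      = (board.map (fun row => (row.count "." : Int))).sum := by
  rw [pv_moves_eq, List.length_flatMap]
  have hrow : ∀ row : List String,
      List.countP (fun j => PySem.List.pyGetD row j "" == ".")
        (PySem.List.pyRange 0 (row.length : Int)) = row.count "." := by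
    intro row
    conv_rhs => rw [← PySem.List.map_pyGetD_pyRange_zero row ""]
    rw [List.count_eq_countP, List.countP_map]
    rfl
  have h1 : (PySem.List.pyRange 0 (board.length : Int)).map (fun i =>
        (((PySem.List.pyRange 0 (((PySem.List.pyGetD board i []).length : Int))).filter
          (fun j => PySem.List.pyGetD (PySem.List.pyGetD board i []) j "" == ".")).map
          (fun j => ((i, j) : Int × Int))).length)
      = (PySem.List.pyRange 0 (board.length : Int)).map (fun i => (PySem.List.pyGetD board i []).count ".") := by
    apply List.map_congr_left
    intro i _
    rw [List.length_map, ← List.countP_eq_length_filter]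
    exact hrow (PySem.List.pyGetD board i [])
  rw [h1]
  have h2 : (PySem.List.pyRange 0 (board.length : Int)).map (fun i => (PySem.List.pyGetD board i []).count ".")
      = board.map (fun row => row.count ".") := by
    have := PySem.List.map_pyGetD_pyRange_zero board []
    rw [PySem.List.len_eq] at this
    calc (PySem.List.pyRange 0 (board.length : Int)).map (fun i => (PySem.List.pyGetD board i []).count ".")
        = ((PySem.List.pyRange 0 (board.length : Int)).map (fun i => PySem.List.pyGetD board i [])).map (fun row => row.count ".") := by
          rw [List.map_map]; rfl
      _ = board.map (fun row => row.count ".") := by rw [this]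
  rw [h2]
  rw [Nat.cast_list_sum, List.map_map]
  rfl

theorem pv_A_closed (board : List (List String)) (player : String) :
    threat_detection board player
      = if 0 < pv_defense board player then ((pv_generate_possible_moves board).length : Int) else 0 := by
  unfold threat_detection
  rw [PySem.List.foldl_congr_mem _ _ (fun pt _ => if 0 < pv_defense board player then pt + 1 else pt) 0 ?_]
  · rw [PySem.List.foldl_ite_add_one (fun _ => 0 < pv_defense board player)]
    by_cases h : 0 < pv_defense board player
    · simp [h]
    · simp [h]
  · intro acc mv hmv
    obtain ⟨a, c, h1, h2, ha, hc, hdot⟩ := pv_mem_moves board mv hmv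
    have hset : PySem.List.pySetD board mv.1 (PySem.List.pySetD (PySem.List.pyGetD board mv.1 []) mv.2 player)
        = board.set a ((board.getD a []).set c player) := by
      rw [h1, h2]
      rw [pv_pyGetD_nonneg board _ [] (by omega), Int.toNat_natCast]
      rw [pv_pySetD_eq_set (board.getD a []) _ player (by omega) (by exact_mod_cast hc), Int.toNat_natCast]
      rw [pv_pySetD_eq_set board _ _ (by omega) (by exact_mod_cast ha), Int.toNat_natCast]
    rw [hset]
    have hgd : board.getD a [] = board[a]'ha := List.getD_eq_getElem _ _ ha
    rw [hgd] at hc hdot ⊢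
    rw [pv_defense_set board player a c ha hc ((List.getD_eq_getElem _ _ hc) ▸ hdot)]

theorem pv_defense_pos (board : List (List String)) (player : String) :
    0 < pv_defense board player ↔
      ((board.any (fun row => (PySem.List.pyRange 0 ((row.length : Int) - 3)).any (fun i =>
          decide (2 ≤ ((PySem.List.slice row (some i) (some (i + 4))).count (pv_get_opponent player) : Int)))))
      || (((PySem.List.pyRange 0 ((board.headD []).length : Int)).map (fun j => board.map (fun row => PySem.List.pyGetD row j ""))).any (fun col => (PySem.List.pyRange 0 ((board.length : Int) - 3)).any (fun i =>
          decide (2 ≤ ((PySem.List.slice col (some i) (some (i + 4))).count (pv_get_opponent player) : Int)))))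
      || ((PySem.List.pyRange 0 ((board.length : Int) - 3)).any (fun i => (PySem.List.pyRange 0 (((board.headD []).length : Int) - 3)).any (fun j =>
          decide (2 ≤ (((PySem.List.pyRange 0 4).map (fun k => PySem.List.pyGetD (PySem.List.pyGetD board (i + k) []) (j + k) "")).count (pv_get_opponent player) : Int)))))
      || ((PySem.List.pyRange 3 (board.length : Int)).any (fun i => (PySem.List.pyRange 0 (((board.headD []).length : Int) - 3)).any (fun j =>
          decide (2 ≤ (((PySem.List.pyRange 0 4).map (fun k => PySem.List.pyGetD (PySem.List.pyGetD board (i - k) []) (j + k) "")).count (pv_get_opponent player) : Int)))))) = true := by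
  rw [pv_defense_eq]
  have hR0 : ∀ x ∈ board, (0:Int) ≤ pvRowsC (pv_get_opponent player) x := by
    intro x _; unfold pvRowsC; positivity
  have hC0 : ∀ j ∈ PySem.List.pyRange 0 ((board.headD []).length : Int),
      (0:Int) ≤ pvRowsC (pv_get_opponent player) (pvCol board j) := by
    intro j _; unfold pvRowsC; positivity
  have hDterm : ∀ i j, (0:Int) ≤ pvD1 (pv_get_opponent player) board (board.length : Int) ((board.headD []).length : Int) i j
      + pvD2 (pv_get_opponent player) board (board.length : Int) ((board.headD []).length : Int) i j := by
    intro i j; unfold pvD1 pvD2; split_ifs <;> omega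
  have hD0 : ∀ i ∈ PySem.List.pyRange 0 (board.length : Int),
      (0:Int) ≤ ((PySem.List.pyRange 0 ((board.headD []).length : Int)).map
        (fun j => pvD1 (pv_get_opponent player) board (board.length : Int) ((board.headD []).length : Int) i j
                + pvD2 (pv_get_opponent player) board (board.length : Int) ((board.headD []).length : Int) i j)).sum := by
    intro i _
    apply List.sum_nonneg
    intro x hx
    obtain ⟨j, _, rfl⟩ := List.mem_map.mp hx
    exact hDterm i j
  have hRs : (0:Int) ≤ (board.map (pvRowsC (pv_get_opponent player))).sum := by
    apply List.sum_nonneg; intro x hx; obtain ⟨r, hr, rfl⟩ := List.mem_map.mp hx; exact hR0 r hr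
  have hCs : (0:Int) ≤ ((PySem.List.pyRange 0 ((board.headD []).length : Int)).map
      (fun j => pvRowsC (pv_get_opponent player) (pvCol board j))).sum := by
    apply List.sum_nonneg; intro x hx; obtain ⟨j, hj, rfl⟩ := List.mem_map.mp hx; exact hC0 j hj
  have hDs : (0:Int) ≤ ((PySem.List.pyRange 0 (board.length : Int)).map
          (fun i => ((PySem.List.pyRange 0 ((board.headD []).length : Int)).map
            (fun j => pvD1 (pv_get_opponent player) board (board.length : Int) ((board.headD []).length : Int) i j
                    + pvD2 (pv_get_opponent player) board (board.length : Int) ((board.headD []).length : Int) i j)).sum)).sum := by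
    apply List.sum_nonneg; intro x hx; obtain ⟨i, hi, rfl⟩ := List.mem_map.mp hx; exact hD0 i hi
  have hRiff : 0 < (board.map (pvRowsC (pv_get_opponent player))).sum ↔
      (board.any (fun row => (PySem.List.pyRange 0 ((row.length : Int) - 3)).any (fun i =>
        decide (2 ≤ ((PySem.List.slice row (some i) (some (i + 4))).count (pv_get_opponent player) : Int))))) = true := by
    rw [pv_sum_pos_iff board _ hR0]
    simp only [List.any_eq_true, pvRowsC, Int.natCast_pos, List.countP_pos_iff]
  have hCiff : 0 < ((PySem.List.pyRange 0 ((board.headD []).length : Int)).map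
        (fun j => pvRowsC (pv_get_opponent player) (pvCol board j))).sum ↔
      (((PySem.List.pyRange 0 ((board.headD []).length : Int)).map (fun j => board.map (fun row => PySem.List.pyGetD row j ""))).any
        (fun col => (PySem.List.pyRange 0 ((board.length : Int) - 3)).any (fun i =>
          decide (2 ≤ ((PySem.List.slice col (some i) (some (i + 4))).count (pv_get_opponent player) : Int))))) = true := by
    rw [pv_sum_pos_iff _ _ hC0, List.any_map]
    simp only [List.any_eq_true, pvRowsC, Int.natCast_pos, List.countP_pos_iff, Function.comp_apply,
      pvCol, List.length_map]
    exact Iff.rfl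
  have hsplit : ∀ i j, 0 < pvD1 (pv_get_opponent player) board (board.length : Int) ((board.headD []).length : Int) i j
        + pvD2 (pv_get_opponent player) board (board.length : Int) ((board.headD []).length : Int) i j ↔
      (((i + 3 < (board.length : Int) ∧ j + 3 < ((board.headD []).length : Int)) ∧ 2 ≤ ((pvDiag1 board i j).count (pv_get_opponent player) : Int))
      ∨ ((0 ≤ i - 3 ∧ j + 3 < ((board.headD []).length : Int)) ∧ 2 ≤ ((pvDiag2 board i j).count (pv_get_opponent player) : Int))) := by
    intro i j
    unfold pvD1 pvD2
    split_ifs <;> simp_all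
  have hDiff : 0 < ((PySem.List.pyRange 0 (board.length : Int)).map
          (fun i => ((PySem.List.pyRange 0 ((board.headD []).length : Int)).map
            (fun j => pvD1 (pv_get_opponent player) board (board.length : Int) ((board.headD []).length : Int) i j
                    + pvD2 (pv_get_opponent player) board (board.length : Int) ((board.headD []).length : Int) i j)).sum)).sum ↔
      (((PySem.List.pyRange 0 ((board.length : Int) - 3)).any (fun i => (PySem.List.pyRange 0 (((board.headD []).length : Int) - 3)).any (fun j =>
          decide (2 ≤ (((PySem.List.pyRange 0 4).map (fun k => PySem.List.pyGetD (PySem.List.pyGetD board (i + k) []) (j + k) "")).count (pv_get_opponent player) : Int))))) = true)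
      ∨ (((PySem.List.pyRange 3 (board.length : Int)).any (fun i => (PySem.List.pyRange 0 (((board.headD []).length : Int) - 3)).any (fun j =>
          decide (2 ≤ (((PySem.List.pyRange 0 4).map (fun k => PySem.List.pyGetD (PySem.List.pyGetD board (i - k) []) (j + k) "")).count (pv_get_opponent player) : Int))))) = true) := by
    rw [pv_sum_pos_iff _ _ hD0]
    have hex : (∃ i ∈ PySem.List.pyRange 0 (board.length : Int),
        0 < ((PySem.List.pyRange 0 ((board.headD []).length : Int)).map
          (fun j => pvD1 (pv_get_opponent player) board (board.length : Int) ((board.headD []).length : Int) i j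
                  + pvD2 (pv_get_opponent player) board (board.length : Int) ((board.headD []).length : Int) i j)).sum) ↔
        ∃ i ∈ PySem.List.pyRange 0 (board.length : Int), ∃ j ∈ PySem.List.pyRange 0 ((board.headD []).length : Int),
          (((i + 3 < (board.length : Int) ∧ j + 3 < ((board.headD []).length : Int)) ∧ 2 ≤ ((pvDiag1 board i j).count (pv_get_opponent player) : Int))
          ∨ ((0 ≤ i - 3 ∧ j + 3 < ((board.headD []).length : Int)) ∧ 2 ≤ ((pvDiag2 board i j).count (pv_get_opponent player) : Int))) := by
      apply exists_congr; intro i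
      apply and_congr_right; intro _
      rw [pv_sum_pos_iff _ _ (fun j _ => hDterm i j)]
      apply exists_congr; intro j
      apply and_congr_right; intro _
      exact hsplit i j
    rw [hex]
    simp only [List.any_eq_true, PySem.List.mem_pyRange_one, decide_eq_true_eq, pvDiag1, pvDiag2]
    constructor
    · rintro ⟨i, ⟨hi0, hin⟩, j, ⟨hj0, hjm⟩, (⟨⟨hg1, hg2⟩, hcnt⟩ | ⟨⟨hg1, hg2⟩, hcnt⟩)⟩
      · exact Or.inl ⟨i, ⟨by omega, by omega⟩, j, ⟨by omega, by omega⟩, hcnt⟩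
      · exact Or.inr ⟨i, ⟨by omega, by omega⟩, j, ⟨by omega, by omega⟩, hcnt⟩
    · rintro (⟨i, ⟨hi0, hin⟩, j, ⟨hj0, hjm⟩, hcnt⟩ | ⟨i, ⟨hi0, hin⟩, j, ⟨hj0, hjm⟩, hcnt⟩)
      · exact ⟨i, ⟨by omega, by omega⟩, j, ⟨by omega, by omega⟩, Or.inl ⟨⟨by omega, by omega⟩, hcnt⟩⟩
      · exact ⟨i, ⟨by omega, by omega⟩, j, ⟨by omega, by omega⟩, Or.inr ⟨⟨by omega, by omega⟩, hcnt⟩⟩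
  simp only [Bool.or_eq_true]
  rw [← hRiff, ← hCiff]
  constructor
  · intro h
    by_cases h1 : 0 < (board.map (pvRowsC (pv_get_opponent player))).sum
    · exact Or.inl (Or.inl (Or.inl h1))
    by_cases h2 : 0 < ((PySem.List.pyRange 0 ((board.headD []).length : Int)).map
        (fun j => pvRowsC (pv_get_opponent player) (pvCol board j))).sum
    · exact Or.inl (Or.inl (Or.inr h2))
    rcases hDiff.mp (by omega) with h3 | h4
    · exact Or.inl (Or.inr h3)
    · exact Or.inr h4
  · rintro (((h | h) | h) | h)
    · omega
    · omega
    · have := hDiff.mpr (Or.inl h); omega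
    · have := hDiff.mpr (Or.inr h); omega

theorem threat_detection_spec : Claim_equal_threat_detection := by
  intro board player _ _
  unfold Spec_threat_detection threat_detection_alt
  rw [pv_A_closed, pv_moves_length]
  rw [show (if player == "O" then "X" else "O") = pv_get_opponent player from rfl]
  by_cases hE : (board.map (fun row => (row.count "." : Int))).sum = 0
  · rw [if_pos hE, hE]
    simp
  · rw [if_neg hE]
    by_cases hT : 0 < pv_defense board player
    · rw [if_pos hT, if_pos ((pv_defense_pos board player).mp hT)]
    · rw [if_neg hT, if_neg (fun h => hT ((pv_defense_pos board player).mpr h))]
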